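-- pv_equiv track=rewrite | github.com/saifeemustafaq/hackerrankproblemsolving | Birthday_chocolate_the_birthday_bar.py | chocolate
-- ===== SOURCE A (Python) =====
-- def chocolate(arr, total, limit):
--     adds = []
--     result = 0
--
--     while len(arr) > limit-1:
--         temp = sum(arr[:limit])
--         adds.append(temp)
--         del arr[0]
--
--     for x in adds:
--         if x == total:
--             result += 1
--     return result
-- ===== SOURCE B (Python) =====
-- def chocolate(arr, total, limit):
--     # One-pass sliding window over a zip of incoming/outgoing elements.
--     # (Does not mutate arr; A empties it in place while looping.)
--     if limit < 1 or len(arr) < limit: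
--         return 0
--     window = sum(arr[:limit])
--     count = 1 if window == total else 0
--     for incoming, outgoing in zip(arr[limit:], arr):
--         window += incoming - outgoing
--         if window == total:
--             count += 1
--     return count
-- ===== Notes on version B (the rewrite author's own statement) =====
-- stated objective: faster
-- what changed: A recomputes sum(arr[:limit]) from scratch for every window position (and destroys arr with del arr[0]); B keeps one running window sum updated in a single pass over zip(arr[limit:], arr).
import Mathlib
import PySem

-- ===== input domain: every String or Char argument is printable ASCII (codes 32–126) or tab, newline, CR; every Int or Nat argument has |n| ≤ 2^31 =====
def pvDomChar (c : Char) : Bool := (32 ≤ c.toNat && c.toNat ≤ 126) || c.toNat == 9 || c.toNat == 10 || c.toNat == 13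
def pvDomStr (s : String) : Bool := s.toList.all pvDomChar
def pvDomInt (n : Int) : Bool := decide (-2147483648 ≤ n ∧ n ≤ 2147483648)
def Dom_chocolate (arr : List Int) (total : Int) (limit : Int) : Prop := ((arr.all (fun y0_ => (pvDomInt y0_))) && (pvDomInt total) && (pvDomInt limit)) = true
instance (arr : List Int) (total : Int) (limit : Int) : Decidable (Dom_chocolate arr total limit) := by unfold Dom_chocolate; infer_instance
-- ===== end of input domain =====

-- B replaces A's per-position sum(arr[:limit]) rescans by a single-pass sliding
-- window with a running sum (objective: faster, asymptotic). Equivalence is about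
-- the RETURN value only: A empties arr in place (del arr[0]); B does not mutate it.

-- ===== PORT A =====
-- while len(arr) > limit-1: adds.append(sum(arr[:limit])); del arr[0]
-- (on an empty arr with the condition still true, Python's 'del arr[0]' raises
--  IndexError — that branch is excluded by Pre_; the port stops there)
def chocoLoopA (arr : List Int) (limit : Int) (adds : List Int) : List Int :=
  if (arr.length : Int) > limit - 1 then
    match arr with
    | [] => adds  -- Python raises IndexError here (limit < 1 only; outside Pre_)
    | _ :: t =>
        chocoLoopA t limit (adds ++ [(PySem.List.slice arr none (some limit)).sum])
  else adds
termination_by arr.length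
decreasing_by simp_all

def chocolate (arr : List Int) (total : Int) (limit : Int) : Int :=
  let adds := chocoLoopA arr limit []
  adds.foldl (fun result x => if x = total then result + 1 else result) 0

-- ===== PORT B =====
def chocolate_alt (arr : List Int) (total : Int) (limit : Int) : Int :=
  if limit < 1 ∨ (arr.length : Int) < limit then 0
  else
    let window0 := (PySem.List.slice arr none (some limit)).sum
    let count0 : Int := if window0 = total then 1 else 0
    let r := (List.zip (PySem.List.slice arr (some limit) none) arr).foldl
      (fun (wc : Int × Int) p =>
        let w := wc.1 + p.1 - p.2
        (w, if w = total then wc.2 + 1 else wc.2))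
      (window0, count0)
    r.2

-- ===== PRECONDITION & SPEC =====
-- Pre_ excludes exactly limit < 1: there A's loop eventually does 'del arr[0]'
-- on the emptied list and raises IndexError (for every arr).
def Pre_chocolate (arr : List Int) (total : Int) (limit : Int) : Prop := 1 ≤ limit
instance (arr : List Int) (total : Int) (limit : Int) : Decidable (Pre_chocolate arr total limit) := by unfold Pre_chocolate; infer_instance
def pvWitness_chocolate : List Int × Int × Int := ([1, 2, 1, 3, 2], 3, 2)

def Spec_chocolate (arr : List Int) (total : Int) (limit : Int) (out : Int) : Prop := out = chocolate_alt arr total limit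
instance (arr : List Int) (total : Int) (limit : Int) (out : Int) : Decidable (Spec_chocolate arr total limit out) := by unfold Spec_chocolate; infer_instance

-- ===== CLAIM (what is proved, stated in full; the proofs are below) =====
def Claim_equal_chocolate : Prop := ∀ (arr : List Int) (total : Int) (limit : Int), Dom_chocolate arr total limit → Pre_chocolate arr total limit → Spec_chocolate arr total limit (chocolate arr total limit)

-- ===== LEMMAS AND PROOFS =====

-- reference: the count of length-K windows summing to total
def winC (K : Nat) (total : Int) : List Int → Int
  | [] => 0
  | h :: t => if K ≤ t.length + 1 then
      (if ((h :: t).take K).sum = total then 1 else 0) + winC K total t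
    else 0

-- the same, for windows starting at position ≥ 1
def winZ (K : Nat) (total : Int) : List Int → Int
  | [] => 0
  | _ :: t => if K ≤ t.length then
      (if (t.take K).sum = total then 1 else 0) + winZ K total t
    else 0

theorem winZ_eq_winC_tail (k : Nat) (total : Int) (l : List Int) :
    winZ (k + 1) total l = winC (k + 1) total l.tail := by
  induction l with
  | nil => simp [winZ, winC]
  | cons h t ih =>
    cases t with
    | nil => simp [winZ, winC]
    | cons h' t' =>
      simp only [winZ, winC, List.tail_cons, List.length_cons] at *
      rw [ih]

theorem winC_zero_of_short (K : Nat) (total : Int) (l : List Int)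
    (h : l.length < K) : winC K total l = 0 := by
  cases l with
  | nil => simp [winC]
  | cons a t => simp only [winC, List.length_cons] at *; omega

theorem foldl_count_shift (total : Int) (l : List Int) (c : Int) :
    l.foldl (fun result x => if x = total then result + 1 else result) c
      = c + l.foldl (fun result x => if x = total then result + 1 else result) 0 := by
  induction l generalizing c with
  | nil => simp
  | cons a t ih =>
    simp only [List.foldl_cons]
    rw [ih, ih (if a = total then 0 + 1 else 0)]
    split <;> ring

theorem chocoLoopA_append (arr : List Int) (limit : Int) (adds : List Int) :
    chocoLoopA arr limit adds = adds ++ chocoLoopA arr limit [] := by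
  induction arr generalizing adds with
  | nil => rw [chocoLoopA, chocoLoopA]; split <;> simp
  | cons h t ih =>
    rw [chocoLoopA, chocoLoopA]
    split
    · simp only [List.nil_append]
      rw [ih, ih [(PySem.List.slice (h :: t) none (some limit)).sum]]
      simp
    · simp

-- A's loop counts exactly the length-K windows
theorem loopA_count (total : Int) (limit : Int) (hlim : 1 ≤ limit) (arr : List Int) :
    (chocoLoopA arr limit []).foldl
        (fun result x => if x = total then result + 1 else result) 0
      = winC limit.toNat total arr := by
  induction arr with
  | nil =>
    rw [chocoLoopA]
    split
    · simp [winC]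
    · simp [winC]
  | cons h t ih =>
    rw [chocoLoopA]
    split
    · next hc =>
      rw [chocoLoopA_append, List.foldl_append]
      simp only [List.nil_append, List.foldl_cons, List.foldl_nil]
      rw [foldl_count_shift, ih]
      have hslice : PySem.List.slice (h :: t) none (some limit)
          = (h :: t).take limit.toNat := PySem.List.slice_to _ (by omega)
      have hK : limit.toNat ≤ t.length + 1 := by
        simp only [List.length_cons] at hc; omega
      simp only [winC, hK, if_true, hslice]
      split <;> ring
    · next hc =>
      simp only [List.foldl_nil]
      have : t.length + 1 < limit.toNat := by
        simp only [List.length_cons] at hc; omega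
      rw [winC_zero_of_short _ _ _ (by simpa using this)]

-- B's sliding-window loop: the second component counts windows at positions ≥ 1
theorem loopB_count (total : Int) (k : Nat) (l : List Int) (c : Int) :
    ((List.zip (l.drop (k + 1)) l).foldl
        (fun (wc : Int × Int) p =>
          let w := wc.1 + p.1 - p.2
          (w, if w = total then wc.2 + 1 else wc.2))
        ((l.take (k + 1)).sum, c)).2
      = c + winZ (k + 1) total l := by
  induction l generalizing c with
  | nil => simp [winZ]
  | cons h t ih =>
    by_cases hk : k + 1 ≤ t.length
    · have hlt : k < t.length := by omega
      have hdrop : (h :: t).drop (k + 1) = t[k] :: t.drop (k + 1) := by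
        rw [List.drop_succ_cons, List.drop_eq_getElem_cons hlt]
      have htake : (t.take (k + 1)).sum = (((h :: t).take (k + 1)).sum + t[k] - h) := by
        rw [List.take_add_one, List.getElem?_eq_getElem hlt, List.take_succ_cons]
        simp only [Option.toList_some, List.sum_append, List.sum_cons, List.sum_nil]
        ring
      rw [hdrop, List.zip_cons_cons, List.foldl_cons]
      simp only
      rw [← htake, ih]
      simp only [winZ, hk, if_true]
      split <;> ring
    · have hdrop : (h :: t).drop (k + 1) = [] := by
        apply List.drop_eq_nil_of_le; simp; omega
      rw [hdrop]
      simp only [List.zip_nil_left, List.foldl_nil, winZ, hk, if_false, add_zero]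

-- ===== VERDICT (by name: the statement is the Claim_ definition above) =====
theorem chocolate_spec : Claim_equal_chocolate := by
  intro arr total limit _ hpre
  unfold Spec_chocolate chocolate chocolate_alt
  have hlim : 1 ≤ limit := hpre
  have hnotlt : ¬ limit < 1 := by omega
  by_cases hlen : (arr.length : Int) < limit
  · simp only [hnotlt, hlen, or_true, if_true]
    rw [loopA_count total limit hlim]
    exact winC_zero_of_short _ _ _ (by omega)
  · simp only [hnotlt, hlen, or_false, if_false]
    rw [loopA_count total limit hlim]
    obtain ⟨k, hk⟩ : ∃ k : Nat, limit.toNat = k + 1 := ⟨limit.toNat - 1, by omega⟩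
    have hslice1 : PySem.List.slice arr none (some limit) = arr.take limit.toNat :=
      PySem.List.slice_to _ (by omega)
    have hslice2 : PySem.List.slice arr (some limit) none = arr.drop limit.toNat :=
      PySem.List.slice_from _ (by omega)
    rw [hslice1, hslice2, hk]
    rw [loopB_count total k arr _]
    rw [winZ_eq_winC_tail]
    cases arr with
    | nil => exact absurd hlim (by simp at hlen; omega)
    | cons h t =>
      have hK : k + 1 ≤ t.length + 1 := by simp at hlen; omega
      simp only [winC, hK, if_true, List.tail_cons]
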